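-- pv_equiv track=rewrite | github.com/HarryHenryGebel/code-challenge | random/fibonacciSimpleSum-commented.py | fibonacciSimpleSum
-- ===== SOURCE A (Python) =====
-- def fibonacciSimpleSum(number):
--     """Determine if a number is the sum of two Fibonacci numbers. Return
-- True if it is, otherwise return False."""
--
--     # 0, 1, 2, and 3 are Fibonacci numbers, and all Fibonacci numbers
--     # pass because 0 is a Fibonacci number, and x + 0 = x, 4 passes
--     # because 2 + 2 = 4, etc. 12 is the first number that is not the
--     # sum of 2 Fibonacci numbers.
--     if number < 12:
--         return True
--
--     # Store all the Fibonacci numbers that we have found so far. Seed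
--     # the set with Fibonacci numbers up to 5. Note: these are all the
--     # Fibonacci numbers up to 5, but they are not the Fibonacci set,
--     # which has 1 twice. For our purposes we don't need the actual
--     # Fibonacci set because we only need a list of numbers we can
--     # check. There is no reason to check a number twice. Only storing
--     # 1 once allows us to use the very efficient Python set
--     # collection.
--     numbers = {0, 1, 2, 3, 5}
--
--     # The first Fibonacci number we will actually add to the starting
--     # set is 8.
--     last_number = 5
--     this_number = 8
--
--     while this_number <= number:
--         # Store this number and see what number we have to add to get
--         # the target
--         numbers.add(this_number)
--         target = number - this_number
--
--         # Check if the target number is a Fibonacci number we've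
--         # already found. If it is return True, otherwise, add it to
--         # our set of Fibonacci numbers.
--         if target in numbers or target == this_number:
--             return True
--
--         # advance to the next Fibonacci number.
--         next_number = last_number + this_number
--         last_number = this_number
--         this_number = next_number
--
--     # The loop exited without finding a match, so return False
--     return False
-- ===== SOURCE B (Python) =====
-- def fibonacciSimpleSum(number):
--     """Determine if a number is the sum of two Fibonacci numbers. Return
-- True if it is, otherwise return False."""
--     # Every number below 12 is a sum of two Fibonacci numbers.
--     if number < 12:
--         return True
--     # Ascending Fibonacci numbers up to `number`.
--     fibs = [0, 1]
--     a, b = 0, 1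
--     while a + b <= number:
--         a, b = b, a + b
--         fibs.append(b)
--     # Two-pointer search for a pair (allowing the same element twice).
--     i, j = 0, len(fibs) - 1
--     while i <= j:
--         s = fibs[i] + fibs[j]
--         if s == number:
--             return True
--         elif s < number:
--             i += 1
--         else:
--             j -= 1
--     return False
-- ===== Notes on version B (the rewrite author's own statement) =====
-- stated objective: alternative
-- what changed: Replaces A's growing hash-set with a membership probe at each new Fibonacci number by building the ascending Fibonacci list once and running a classic two-pointer pair search over it.
import Mathlib
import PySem

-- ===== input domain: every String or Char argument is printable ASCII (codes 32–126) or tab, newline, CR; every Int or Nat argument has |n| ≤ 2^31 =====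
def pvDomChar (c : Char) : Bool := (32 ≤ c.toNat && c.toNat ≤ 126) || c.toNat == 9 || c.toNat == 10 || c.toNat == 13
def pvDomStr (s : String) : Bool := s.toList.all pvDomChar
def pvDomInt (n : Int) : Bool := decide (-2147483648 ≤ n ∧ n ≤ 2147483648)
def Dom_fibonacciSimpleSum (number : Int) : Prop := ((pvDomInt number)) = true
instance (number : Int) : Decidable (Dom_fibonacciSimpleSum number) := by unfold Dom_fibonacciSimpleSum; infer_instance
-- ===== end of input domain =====

-- B replaces A's growing hash-set with a membership probe per new Fibonacci number
-- by building the ascending Fibonacci list once and running a two-pointer pair search.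

-- ===== PORT A =====
-- while-loop of A; the two proof arguments only justify termination (fib state grows)
def fibA_loop (number : Int) (numbers : PySem.Set Int) (last this : Int)
    (h1 : 1 ≤ last) (h2 : last < this) : Bool :=
  if h : this ≤ number then
    let numbers' := PySem.Set.add numbers this
    let target := number - this
    if PySem.Set.contains numbers' target || target == this then true
    else fibA_loop number numbers' this (last + this) (by omega) (by omega)
  else false
termination_by (number + 1 - this).toNat
decreasing_by omega

def fibonacciSimpleSum (number : Int) : Bool :=
  if number < 12 then true
  else fibA_loop number (PySem.Set.ofList [0, 1, 2, 3, 5]) 5 8 (by omega) (by omega)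

-- ===== PORT B =====
-- first while-loop of B: extend the Fibonacci list while a + b <= number
def buildFibs (number : Int) (fibs : List Int) (a b : Int)
    (h1 : 0 ≤ a) (h2 : a ≤ b) (h3 : 1 ≤ b) : List Int :=
  if h : a + b ≤ number then
    buildFibs number (fibs ++ [a + b]) b (a + b) (by omega) (by omega) (by omega)
  else fibs
termination_by (number + 1 - (a + b)).toNat
decreasing_by omega

-- second while-loop of B: two-pointer scan over the list
def twoPtr (number : Int) (fibs : List Int) (i j : Int) : Bool :=
  if h : i ≤ j then
    let s := (PySem.List.pyGet? fibs i).getD 0 + (PySem.List.pyGet? fibs j).getD 0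
    if s = number then true
    else if s < number then twoPtr number fibs (i + 1) j
    else twoPtr number fibs i (j - 1)
  else false
termination_by (j + 1 - i).toNat
decreasing_by all_goals omega

def fibonacciSimpleSum_alt (number : Int) : Bool :=
  if number < 12 then true
  else
    let fibs := buildFibs number [0, 1] 0 1 (by omega) (by omega) (by omega)
    twoPtr number fibs 0 ((fibs.length : Int) - 1)

-- ===== PRECONDITION & SPEC =====
def Spec_fibonacciSimpleSum (number : Int) (out : Bool) : Prop := out = fibonacciSimpleSum_alt number
instance (number : Int) (out : Bool) : Decidable (Spec_fibonacciSimpleSum number out) := by unfold Spec_fibonacciSimpleSum; infer_instance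

-- ===== CLAIM (what is proved, stated in full; the proofs are below) =====
def Claim_equal_fibonacciSimpleSum : Prop := ∀ (number : Int), Dom_fibonacciSimpleSum number → Spec_fibonacciSimpleSum number (fibonacciSimpleSum number)

-- ===== LEMMAS AND PROOFS =====

-- the Fibonacci numbers as integers
def F (k : ℕ) : Int := (Nat.fib k : Int)

lemma F_nonneg (k : ℕ) : 0 ≤ F k := Int.natCast_nonneg _

lemma F_mono {k l : ℕ} (h : k ≤ l) : F k ≤ F l := by
  unfold F; exact_mod_cast Nat.fib_mono h

lemma F_add_two (k : ℕ) : F (k + 2) = F k + F (k + 1) := by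
  unfold F; rw [Nat.fib_add_two]; push_cast; ring


lemma fibA_loop_iff (n : Int) :
    ∀ (fuel k : ℕ) (s : PySem.Set Int) (last this : Int) (h1 : 1 ≤ last) (h2 : last < this),
      last = F k → this = F (k + 1) →
      (n + 1 - this).toNat ≤ fuel → 2 ≤ k →
      (∀ x : Int, x ∈ s ↔ ∃ l, l ≤ k ∧ F l = x) →
      (fibA_loop n s last this h1 h2 = true ↔
        ∃ m, k + 1 ≤ m ∧ F m ≤ n ∧ ∃ l, l ≤ m ∧ F l = n - F m) := by
  intro fuel
  induction fuel with
  | zero =>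
    intro k s last this h1 h2 hlast hthis hfuel hk hmem
    have hgt : n < this := by omega
    rw [fibA_loop, dif_neg (by omega)]
    simp only [Bool.false_eq_true, false_iff]
    rintro ⟨m, hm, hle, -⟩
    have := F_mono hm
    omega
  | succ fuel ih =>
    intro k s last this h1 h2 hlast hthis hfuel hk hmem
    rw [fibA_loop]
    by_cases hle : this ≤ n
    · rw [dif_pos hle]
      have hmem' : ∀ x : Int, x ∈ PySem.Set.add s this ↔ ∃ l, l ≤ k + 1 ∧ F l = x := by
        intro x
        rw [PySem.Set.mem_add, hthis]
        constructor
        · rintro (hx | rfl)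
          · obtain ⟨l, hl, hlx⟩ := (hmem x).mp hx
            exact ⟨l, by omega, hlx⟩
          · exact ⟨k + 1, le_refl _, rfl⟩
        · rintro ⟨l, hl, rfl⟩
          rcases Nat.lt_or_ge l (k + 1) with h | h
          · exact Or.inl ((hmem _).mpr ⟨l, by omega, rfl⟩)
          · right; have : l = k + 1 := by omega
            rw [this]
      by_cases hcond : ∃ l, l ≤ k + 1 ∧ F l = n - this
      · have hc : (PySem.Set.contains (PySem.Set.add s this) (n - this) || ((n - this) == this)) = true := by
          have hx : n - this ∈ PySem.Set.add s this := by
            rw [hmem']; rw [hthis] at hcond ⊢; exact hcond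
          simp only [Bool.or_eq_true]
          exact Or.inl ((PySem.Set.contains_iff _ _).mpr hx)
        rw [if_pos hc]
        refine iff_of_true rfl ⟨k + 1, le_refl _, by omega, ?_⟩
        rw [← hthis]; exact hcond
      · have hc : ¬ ((PySem.Set.contains (PySem.Set.add s this) (n - this) || ((n - this) == this)) = true) := by
          simp only [Bool.or_eq_true, PySem.Set.contains_iff, beq_iff_eq, not_or]
          refine ⟨fun hx => hcond ((hmem' _).mp hx), fun hx => hcond ⟨k + 1, le_refl _, ?_⟩⟩
          rw [hthis] at hx ⊢; omega
        rw [if_neg hc]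
        rw [ih (k + 1) _ this (last + this) (by omega) (by omega) hthis
          (by rw [hlast, hthis, ← F_add_two]) (by omega) (by omega) hmem']
        constructor
        · rintro ⟨m, hm, hmn, hl⟩
          exact ⟨m, by omega, hmn, hl⟩
        · rintro ⟨m, hm, hmn, hl⟩
          rcases Nat.lt_or_ge m (k + 2) with h | h
          · exfalso
            have hmk : m = k + 1 := by omega
            subst hmk
            rw [← hthis] at hl
            exact hcond hl
          · exact ⟨m, by omega, hmn, hl⟩
    · rw [dif_neg hle]
      simp only [Bool.false_eq_true, false_iff]
      rintro ⟨m, hm, hmn, -⟩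
      have := F_mono hm
      omega

lemma A_iff (n : Int) (hn : ¬ n < 12) :
    (fibonacciSimpleSum n = true ↔ ∃ m, 6 ≤ m ∧ F m ≤ n ∧ ∃ l, l ≤ m ∧ F l = n - F m) := by
  rw [fibonacciSimpleSum, if_neg hn]
  rw [fibA_loop_iff n (n + 1 - 8).toNat 5 _ 5 8 (by omega) (by omega)
    (by unfold F; decide) (by unfold F; decide) (le_refl _) (by omega) ?_]
  intro x
  constructor
  · intro hx
    rw [PySem.Set.mem_ofList] at hx
    simp only [List.mem_cons] at hx
    rcases hx with rfl | rfl | rfl | rfl | rfl | h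
    · exact ⟨0, by omega, by unfold F; decide⟩
    · exact ⟨1, by omega, by unfold F; decide⟩
    · exact ⟨3, by omega, by unfold F; decide⟩
    · exact ⟨4, by omega, by unfold F; decide⟩
    · exact ⟨5, by omega, by unfold F; decide⟩
    · simp at h
  · rintro ⟨l, hl, rfl⟩
    rw [PySem.Set.mem_ofList]
    interval_cases l <;> simp [F] <;> decide

lemma map_F_range_succ (m : ℕ) : List.map F (List.range (m + 1)) = List.map F (List.range m) ++ [F m] := by
  rw [List.range_succ, List.map_append, List.map_singleton]

lemma buildFibs_eq (n : Int) :
    ∀ (fuel k : ℕ) (fibs : List Int) (a b : Int) (h1 : 0 ≤ a) (h2 : a ≤ b) (h3 : 1 ≤ b),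
      a = F k → b = F (k + 1) → fibs = List.map F (List.range (k + 2)) →
      (n + 1 - (a + b)).toNat ≤ fuel → b ≤ n →
      ∃ K, k + 1 ≤ K ∧ F K ≤ n ∧ n < F (K + 1) ∧
        buildFibs n fibs a b h1 h2 h3 = List.map F (List.range (K + 1)) := by
  intro fuel
  induction fuel with
  | zero =>
    intro k fibs a b h1 h2 h3 ha hb hf hfuel hbn
    refine ⟨k + 1, le_refl _, by omega, by rw [F_add_two]; omega, ?_⟩
    rw [buildFibs, dif_neg (by omega), hf]
  | succ fuel ih =>
    intro k fibs a b h1 h2 h3 ha hb hf hfuel hbn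
    rw [buildFibs]
    by_cases hle : a + b ≤ n
    · rw [dif_pos hle]
      obtain ⟨K, hK1, hK2, hK3, hK4⟩ := ih (k + 1) (fibs ++ [a + b]) b (a + b) (by omega) (by omega) (by omega) hb
        (by rw [ha, hb, ← F_add_two]) (by rw [hf, ha, hb, ← F_add_two, map_F_range_succ (k + 2)])
        (by have hb1 : (1:Int) ≤ b := h3; omega) hle
      exact ⟨K, by omega, hK2, hK3, hK4⟩
    · rw [dif_neg hle]
      exact ⟨k + 1, le_refl _, by omega, by rw [F_add_two]; omega, hf⟩

lemma getL (K : ℕ) (i : Int) (h0 : 0 ≤ i) (hK : i ≤ (K : Int)) :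
    (PySem.List.pyGet? (List.map F (List.range (K + 1))) i).getD 0 = F i.toNat := by
  obtain ⟨m, rfl⟩ : ∃ m : ℕ, i = (m : Int) := ⟨i.toNat, (Int.toNat_of_nonneg h0).symm⟩
  rw [PySem.List.pyGet?_natCast]
  have hm : m < K + 1 := by omega
  simp [List.getElem?_map, List.getElem?_range hm]

lemma twoPtr_iff (n : Int) (K : ℕ) :
    ∀ (fuel : ℕ) (i j : Int), (j + 1 - i).toNat ≤ fuel → 0 ≤ i → j ≤ (K : Int) →
      (twoPtr n (List.map F (List.range (K + 1))) i j = true ↔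
        ∃ p q : ℕ, i ≤ (p : Int) ∧ p ≤ q ∧ (q : Int) ≤ j ∧ F p + F q = n) := by
  intro fuel
  induction fuel with
  | zero =>
    intro i j hfuel h0 hK
    have hij : j < i := by omega
    rw [twoPtr, dif_neg (by omega)]
    simp only [Bool.false_eq_true, false_iff]
    rintro ⟨p, q, hp, hpq, hq, -⟩
    omega
  | succ fuel ih =>
    intro i j hfuel h0 hK
    rw [twoPtr]
    by_cases hij : i ≤ j
    · rw [dif_pos hij]
      rw [getL K i h0 (by omega), getL K j (by omega) hK]
      by_cases heq : F i.toNat + F j.toNat = n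
      · rw [if_pos heq]
        refine iff_of_true rfl ⟨i.toNat, j.toNat, by omega, by omega, by omega, heq⟩
      · rw [if_neg heq]
        by_cases hlt : F i.toNat + F j.toNat < n
        · rw [if_pos hlt, ih (i + 1) j (by omega) (by omega) hK]
          constructor
          · rintro ⟨p, q, hp, hpq, hq, hs⟩
            exact ⟨p, q, by omega, hpq, hq, hs⟩
          · rintro ⟨p, q, hp, hpq, hq, hs⟩
            rcases Int.lt_or_le (p : Int) (i + 1) with h | h
            · exfalso
              have hpi : p = i.toNat := by omega
              have hqj : F q ≤ F j.toNat := F_mono (by omega)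
              rw [hpi] at hs
              omega
            · exact ⟨p, q, h, hpq, hq, hs⟩
        · rw [if_neg hlt, ih i (j - 1) (by omega) h0 (by omega)]
          constructor
          · rintro ⟨p, q, hp, hpq, hq, hs⟩
            exact ⟨p, q, hp, hpq, by omega, hs⟩
          · rintro ⟨p, q, hp, hpq, hq, hs⟩
            rcases Int.lt_or_le (j - 1) (q : Int) with h | h
            · exfalso
              have hqj : q = j.toNat := by omega
              have hpi : F i.toNat ≤ F p := F_mono (by omega)
              rw [hqj] at hs
              omega
            · exact ⟨p, q, hp, hpq, h, hs⟩
    · rw [dif_neg hij]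
      simp only [Bool.false_eq_true, false_iff]
      rintro ⟨p, q, hp, hpq, hq, -⟩
      omega

theorem fibonacciSimpleSum_spec : Claim_equal_fibonacciSimpleSum := by
  unfold Claim_equal_fibonacciSimpleSum Spec_fibonacciSimpleSum
  intro n _
  by_cases hn : n < 12
  · rw [fibonacciSimpleSum, fibonacciSimpleSum_alt, if_pos hn, if_pos hn]
  · have hn12 : 12 ≤ n := by omega
    obtain ⟨K, hK1, hK2, hK3, hbuild⟩ :=
      buildFibs_eq n n.toNat 0 [0, 1] 0 1 (by omega) (by omega) (by omega)
        (by unfold F; decide) (by unfold F; decide) (by unfold F; decide)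
        (by omega) (by omega)
    have hA := A_iff n hn
    have hB : (fibonacciSimpleSum_alt n = true ↔
        ∃ p q : ℕ, (0 : Int) ≤ (p : Int) ∧ p ≤ q ∧ (q : Int) ≤ (K : Int) ∧ F p + F q = n) := by
      rw [fibonacciSimpleSum_alt, if_neg hn]
      show twoPtr n (buildFibs n [0, 1] 0 1 _ _ _) 0
        (((buildFibs n [0, 1] 0 1 _ _ _).length : Int) - 1) = true ↔ _
      rw [hbuild]
      have hlen : ((List.map F (List.range (K + 1))).length : Int) - 1 = (K : Int) := by
        simp
      rw [hlen, twoPtr_iff n K (K + 1) 0 (K : Int) (by omega) (by omega) (le_refl _)]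
    have hbridge : (∃ m, 6 ≤ m ∧ F m ≤ n ∧ ∃ l, l ≤ m ∧ F l = n - F m) ↔
        (∃ p q : ℕ, (0 : Int) ≤ (p : Int) ∧ p ≤ q ∧ (q : Int) ≤ (K : Int) ∧ F p + F q = n) := by
      constructor
      · rintro ⟨m, hm6, hmn, l, hl, hE⟩
        refine ⟨l, m, by omega, hl, ?_, by omega⟩
        by_contra h
        have hK1m : K + 1 ≤ m := by omega
        have := F_mono hK1m
        omega
      · rintro ⟨p, q, -, hpq, hqK, hs⟩
        have hq6 : 6 ≤ q := by
          by_contra h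
          have h5 : q ≤ 5 := by omega
          have h1 : F q ≤ F 5 := F_mono h5
          have h2 : F p ≤ F q := F_mono hpq
          have h3 : F 5 = 5 := by unfold F; decide
          omega
        have hFp := F_nonneg p
        exact ⟨q, hq6, by omega, p, hpq, by omega⟩
    have h := hA.trans (hbridge.trans hB.symm)
    cases hx : fibonacciSimpleSum n <;> cases hy : fibonacciSimpleSum_alt n <;> simp_all
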